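-- pv_equiv track=rewrite | github.com/jjiwoning/Code_Test | python_algo/Programmers/Kakao_Id.py | solution
-- ===== SOURCE A (Python) =====
-- def solution(new_id):
--     alpha = {'A':'a', 'B':'b', 'C':'c','D':'d','E':'e','F':'f','G':'g','H':'h','I':'i','J':'j','K':'k','L':'l','M':'m','N':'n','O':'o','P':'p','Q':'q','R':'r','S':'s','T':'t','U':'u','V':'v','W':'w','X':'x','Y':'y','Z':'z','!':'','@':'','#':'','*':'','=':'','+':'','^':'','"':'',"'":'','$':'','%':'','&':'','(':'',')':'','<':'','>':'','?':'','/':'',',':'',':':'','[':'',']':'','}':'','{':'','~':'' }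
--     answer = ''
--     for i in str(new_id):
--         if i in alpha.keys(): #딕셔너리에 있는 키 값이면
--             i = alpha[i] #키 값에 해당하는 밸류로 바꿔줌
--         answer += i # 다 더해줌
--         answer = answer.replace('...','.') #"..."을 '.' 으로 변환 해줌
--         answer = answer.replace('..','.') #위와 같은 원리
--     if answer == '.':
--         answer = 'a'
--     if answer[0] == '.':
--         answer = answer[1:]
--     if answer[-1] == '.':
--         answer = answer[:-1]
--     if answer == '':
--         answer = 'a'
--     if len(answer) >= 16:
--         answer = answer[:15]
--         if answer[-1] == '.':
--             answer = answer[:-1]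
--     if len(answer) <= 2:
--         while len(answer) <=2:
--             answer += answer[-1]
--
--     return answer
-- ===== SOURCE B (Python) =====
-- def solution(new_id):
--     removed = set('!@#*=+^"\'$%&()<>?/,:[]}{~')
--     out = []
--     for c in str(new_id):
--         c = c.lower()
--         if c in removed:
--             continue
--         if c == '.' and out and out[-1] == '.':
--             continue
--         out.append(c)
--     s = ''.join(out).strip('.')
--     s = s[:15].strip('.')
--     if not s:
--         s = 'a'
--     if len(s) < 3:
--         s = s + s[-1] * (3 - len(s))
--     return s
-- ===== Notes on version B (the rewrite author's own statement) =====
-- stated objective: faster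
-- what changed: A re-scans and rewrites the whole accumulated string with two str.replace calls on every character (quadratic); B does one linear pass that lowercases, drops forbidden characters and skips a dot that would follow a dot, then applies the edge rules (strip dots, truncate to 15, pad to 3) once at the end.
import Mathlib
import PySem

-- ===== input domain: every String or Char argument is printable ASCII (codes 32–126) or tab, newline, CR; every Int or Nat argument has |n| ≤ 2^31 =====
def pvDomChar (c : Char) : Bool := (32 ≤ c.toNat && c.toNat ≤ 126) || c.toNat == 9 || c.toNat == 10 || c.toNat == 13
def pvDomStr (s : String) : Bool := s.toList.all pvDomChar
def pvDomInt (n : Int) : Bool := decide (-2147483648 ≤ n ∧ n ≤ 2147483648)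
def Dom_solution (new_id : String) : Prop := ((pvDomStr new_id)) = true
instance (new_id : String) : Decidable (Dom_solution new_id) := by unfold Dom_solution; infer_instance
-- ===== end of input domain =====

-- B replaces A's per-character re-scan of the whole accumulated string (two str.replace calls
-- per character) by a single linear pass plus one application of the edge rules at the end.

-- ===== PORT A =====
-- the dict literal `alpha` (Char keys, String values, Python's insertion order)
def pvAlpha : PySem.Dict Char String := PySem.Dict.ofList
  [('A',"a"),('B',"b"),('C',"c"),('D',"d"),('E',"e"),('F',"f"),('G',"g"),('H',"h"),('I',"i"),
   ('J',"j"),('K',"k"),('L',"l"),('M',"m"),('N',"n"),('O',"o"),('P',"p"),('Q',"q"),('R',"r"),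
   ('S',"s"),('T',"t"),('U',"u"),('V',"v"),('W',"w"),('X',"x"),('Y',"y"),('Z',"z"),
   ('!',""),('@',""),('#',""),('*',""),('=',""),('+',""),('^',""),('"',""),('\'',""),('$',""),
   ('%',""),('&',""),('(',""),(')',""),('<',""),('>',""),('?',""),('/',""),(',',""),(':',""),
   ('[',""),(']',""),('}',""),('{',""),('~',"")]

-- `i = alpha[i] if i in alpha.keys() else i` for one character
def pvMapA (c : Char) : String :=
  if pvAlpha.contains c then pvAlpha.getD c "" else String.singleton c

-- one iteration of A's for-loop
def pvStepA (answer : String) (c : Char) : String :=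
  let answer := answer ++ pvMapA c
  let answer := PySem.Str.replace answer "..." "."
  PySem.Str.replace answer ".." "."

-- `while len(answer) <= 2: answer += answer[-1]` — whenever Python terminates (answer nonempty)
-- the loop body runs at most twice, so fuel 3 only totalises the loop; on an empty answer
-- Python raises IndexError (outside Pre_) and the port stops.
def pvPadA : Nat → String → String
  | 0, answer => answer
  | n+1, answer =>
    if PySem.Str.len answer ≤ 2 then
      match PySem.Str.pyGet? answer (-1) with
      | some ch => pvPadA n (answer.push ch)
      | none => answer
    else answer

def solution (new_id : String) : String :=
  let answer := new_id.toList.foldl pvStepA ""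
  let answer := if answer = "." then "a" else answer
  let answer := if PySem.Str.pyGet? answer 0 = some '.' then PySem.Str.slice answer (some 1) none else answer
  let answer := if PySem.Str.pyGet? answer (-1) = some '.' then PySem.Str.slice answer none (some (-1)) else answer
  let answer := if answer = "" then "a" else answer
  let answer := if 16 ≤ PySem.Str.len answer then
      let answer := PySem.Str.slice answer none (some 15)
      if PySem.Str.pyGet? answer (-1) = some '.' then PySem.Str.slice answer none (some (-1)) else answer
    else answer
  if PySem.Str.len answer ≤ 2 then pvPadA 3 answer else answer

-- ===== PORT B =====
-- `removed = set('!@#*=+^"\'$%&()<>?/,:[]}{~')`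
def pvRemoved : PySem.Set Char := PySem.Set.ofList "!@#*=+^\"'$%&()<>?/,:[]}{~".toList

-- one iteration of B's for-loop
def pvStepB (out : List Char) (c : Char) : List Char :=
  let c := PySem.Chars.lowerChar c
  if pvRemoved.contains c then out
  else if c = '.' ∧ out ≠ [] ∧ out.getLast? = some '.' then out
  else out ++ [c]

-- `s + s[-1] * (3 - len(s))` (only reached with len(s) < 3; s nonempty whenever Python returns)
def pvPadB (s : String) : String :=
  match PySem.Str.pyGet? s (-1) with
  | some ch => s ++ String.ofList (List.replicate (3 - s.toList.length) ch)
  | none => s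

def solution_alt (new_id : String) : String :=
  let out := new_id.toList.foldl pvStepB []
  let s := PySem.Str.stripChars (String.ofList out) "."
  let s := PySem.Str.stripChars (PySem.Str.slice s none (some 15)) "."
  let s := if s = "" then "a" else s
  if PySem.Str.len s < 3 then pvPadB s else s

-- ===== PRECONDITION & SPEC =====
-- the characters A's dict deletes (maps to '')
def pvPunct : List Char := "!@#*=+^\"'$%&()<>?/,:[]}{~".toList

-- A raises IndexError (answer[0] on the empty cleaned string) exactly when every character of
-- new_id is in the removed-punctuation set; Pre_ excludes exactly those inputs.
def Pre_solution (new_id : String) : Prop := (new_id.toList.any (fun c => !(pvPunct.contains c))) = true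
instance (new_id : String) : Decidable (Pre_solution new_id) := by unfold Pre_solution; infer_instance
def pvWitness_solution : String := "abc"

def Spec_solution (new_id : String) (out : String) : Prop := out = solution_alt new_id
instance (new_id : String) (out : String) : Decidable (Spec_solution new_id out) := by unfold Spec_solution; infer_instance

-- ===== CLAIM (what is proved, stated in full; the proofs are below) =====
def Claim_equal_solution : Prop := ∀ (new_id : String), Dom_solution new_id → Pre_solution new_id → Spec_solution new_id (solution new_id)

-- ===== LEMMAS AND PROOFS =====

-- "no two adjacent dots" invariant
def OkL (xs : List Char) : Prop := List.IsChain (fun a b => ¬(a = '.' ∧ b = '.')) xs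

-- per-character behaviour of A's dict lookup vs B's lower-then-filter, over ASCII
set_option maxRecDepth 100000 in
theorem pvChar_all : (List.range 128).all (fun n =>
    (pvMapA (Char.ofNat n) ==
      if pvRemoved.contains (PySem.Chars.lowerChar (Char.ofNat n)) then ""
      else String.singleton (PySem.Chars.lowerChar (Char.ofNat n)))
    && (decide (Char.ofNat n ∈ pvPunct) == pvRemoved.contains (PySem.Chars.lowerChar (Char.ofNat n)))) = true := by
  decide

theorem pvChar_spec (c : Char) (hc : pvDomChar c = true) :
    (pvMapA c =
      if pvRemoved.contains (PySem.Chars.lowerChar c) then ""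
      else String.singleton (PySem.Chars.lowerChar c))
    ∧ ((c ∈ pvPunct) ↔ pvRemoved.contains (PySem.Chars.lowerChar c) = true) := by
  have hlt : c.toNat < 128 := by
    unfold pvDomChar at hc
    simp only [Bool.or_eq_true, Bool.and_eq_true, decide_eq_true_eq, beq_iff_eq] at hc
    omega
  have h := List.all_eq_true.mp pvChar_all c.toNat (by simpa using hlt)
  rw [Char.ofNat_toNat] at h
  simp only [Bool.and_eq_true, beq_iff_eq] at h
  obtain ⟨h1, h2⟩ := h
  refine ⟨h1, ?_⟩
  rw [← h2]
  simp

theorem go_nomatch (old new : List Char) : ∀ (l : List Char) (fuel : Nat) (acc : List Char),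
    l.length ≤ fuel → (∀ i, old.isPrefixOf (l.drop i) = false) →
    PySem.Chars.replace.go old new fuel l acc = acc.reverse ++ l := by
  intro l
  induction l with
  | nil => intro fuel acc _ _; cases fuel <;> simp [PySem.Chars.replace.go]
  | cons c t ih =>
    intro fuel acc hf hnm
    cases fuel with
    | zero => simp at hf
    | succ f =>
      have h0 := hnm 0
      simp only [List.drop_zero] at h0
      rw [show PySem.Chars.replace.go old new (f+1) (c::t) acc =
          (if old.isPrefixOf (c::t) then PySem.Chars.replace.go old new f (List.drop old.length (c::t)) (new.reverse ++ acc)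
           else PySem.Chars.replace.go old new f t (c :: acc)) from by simp [PySem.Chars.replace.go]]
      rw [h0]
      simp only [Bool.false_eq_true, if_false]
      rw [ih f (c::acc) (by simpa using hf) (fun i => by simpa using hnm (i+1))]
      simp

theorem isPrefixOf_false_of_short (p xs : List Char) (h : xs.length < p.length) :
    p.isPrefixOf xs = false := by
  by_contra hc
  have hp : p <+: xs := List.isPrefixOf_iff_prefix.mp (by simpa using hc)
  have := hp.length_le
  omega

theorem nomatch2 (l : List Char) (h : OkL l) (i : Nat) :
    (['.','.'] : List Char).isPrefixOf (l.drop i) = false := by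
  have hok : OkL (l.drop i) := List.IsChain.suffix h (List.drop_suffix i l)
  cases hd : l.drop i with
  | nil => simp [List.isPrefixOf]
  | cons x t =>
    cases t with
    | nil => exact isPrefixOf_false_of_short _ _ (by simp)
    | cons y r =>
      rw [hd] at hok
      have hxy := (List.isChain_cons_cons.mp hok).1
      rw [Bool.eq_false_iff]
      intro hc
      have hp := List.isPrefixOf_iff_prefix.mp hc
      rw [List.cons_prefix_cons] at hp
      obtain ⟨hx, hp2⟩ := hp
      rw [List.cons_prefix_cons] at hp2
      exact hxy ⟨hx.symm, hp2.1.symm⟩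

theorem nomatch3 (l : List Char) (h : OkL l) (i : Nat) :
    (['.','.','.'] : List Char).isPrefixOf (l.drop i) = false := by
  have hok : OkL (l.drop i) := List.IsChain.suffix h (List.drop_suffix i l)
  cases hd : l.drop i with
  | nil => simp [List.isPrefixOf]
  | cons x t =>
    cases t with
    | nil => exact isPrefixOf_false_of_short _ _ (by simp)
    | cons y r =>
      rw [hd] at hok
      have hxy := (List.isChain_cons_cons.mp hok).1
      rw [Bool.eq_false_iff]
      intro hc
      have hp := List.isPrefixOf_iff_prefix.mp hc
      rw [List.cons_prefix_cons] at hp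
      obtain ⟨hx, hp2⟩ := hp
      rw [List.cons_prefix_cons] at hp2
      exact hxy ⟨hx.symm, hp2.1.symm⟩

theorem rep2_ok (xs : List Char) (h : OkL xs) : PySem.Chars.replace xs ['.','.'] ['.'] = xs := by
  unfold PySem.Chars.replace
  rw [if_neg (by simp)]
  rw [go_nomatch _ _ xs xs.length [] le_rfl (nomatch2 xs h)]
  simp

theorem rep3_ok (xs : List Char) (h : OkL xs) : PySem.Chars.replace xs ['.','.','.'] ['.'] = xs := by
  unfold PySem.Chars.replace
  rw [if_neg (by simp)]
  rw [go_nomatch _ _ xs xs.length [] le_rfl (nomatch3 xs h)]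
  simp

theorem go2_collapse : ∀ (t : List Char) (fuel : Nat) (acc : List Char), t.length + 2 ≤ fuel →
    OkL (t ++ ['.']) →
    PySem.Chars.replace.go ['.','.'] ['.'] fuel (t ++ ['.','.']) acc = acc.reverse ++ t ++ ['.'] := by
  intro t
  induction t with
  | nil =>
    intro fuel acc hf hok
    cases fuel with
    | zero => exact absurd hf (by omega)
    | succ f =>
      rw [show ((([] : List Char) ++ ['.','.']) = ['.','.']) from rfl]
      rw [show PySem.Chars.replace.go ['.','.'] ['.'] (f+1) ['.','.'] acc =
          PySem.Chars.replace.go ['.','.'] ['.'] f [] ('.' :: acc) from by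
        simp [PySem.Chars.replace.go, List.isPrefixOf]]
      cases f <;> simp [PySem.Chars.replace.go]
  | cons c t' ih =>
    intro fuel acc hf hok
    cases fuel with
    | zero => exact absurd hf (by omega)
    | succ f =>
      have hpre : (['.','.'] : List Char).isPrefixOf (c :: (t' ++ ['.','.'])) = false := by
        rw [Bool.eq_false_iff]
        intro hcp
        have hp := List.isPrefixOf_iff_prefix.mp hcp
        rw [List.cons_prefix_cons] at hp
        obtain ⟨hx, hp2⟩ := hp
        cases t' with
        | nil =>
          have hok2 : OkL (c :: ['.']) := by simpa using hok
          have hc := (List.isChain_cons_cons.mp hok2).1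
          exact hc ⟨hx.symm, rfl⟩
        | cons e r =>
          have hok2 : OkL (c :: e :: (r ++ ['.'])) := by simpa using hok
          have hce := (List.isChain_cons_cons.mp hok2).1
          rw [show ((e :: r) ++ ['.','.']) = e :: (r ++ ['.','.']) from rfl, List.cons_prefix_cons] at hp2
          exact hce ⟨hx.symm, hp2.1.symm⟩
      rw [show ((c :: t') ++ ['.','.']) = c :: (t' ++ ['.','.']) from rfl]
      rw [show PySem.Chars.replace.go ['.','.'] ['.'] (f+1) (c :: (t' ++ ['.','.'])) acc =
          (if (['.','.'] : List Char).isPrefixOf (c :: (t' ++ ['.','.'])) then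
            PySem.Chars.replace.go ['.','.'] ['.'] f (List.drop 2 (c :: (t' ++ ['.','.']))) (['.'].reverse ++ acc)
           else PySem.Chars.replace.go ['.','.'] ['.'] f (t' ++ ['.','.']) (c :: acc)) from by
        simp [PySem.Chars.replace.go]]
      rw [hpre]
      simp only [Bool.false_eq_true, if_false]
      rw [ih f (c :: acc) (by simp only [List.length_cons] at hf; omega) (List.IsChain.tail hok)]
      simp

theorem go3_skip : ∀ (t : List Char) (fuel : Nat) (acc : List Char), t.length + 2 ≤ fuel →
    OkL (t ++ ['.']) →
    PySem.Chars.replace.go ['.','.','.'] ['.'] fuel (t ++ ['.','.']) acc = acc.reverse ++ (t ++ ['.','.']) := by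
  intro t
  induction t with
  | nil =>
    intro fuel acc hf _
    rw [show ((([] : List Char) ++ ['.','.']) = ['.','.']) from rfl]
    refine go_nomatch _ _ ['.','.'] fuel acc (by simpa using hf) (fun i => ?_)
    apply isPrefixOf_false_of_short
    simp only [List.length_drop, List.length_cons, List.length_nil]
    omega
  | cons c t' ih =>
    intro fuel acc hf hok
    cases fuel with
    | zero => exact absurd hf (by omega)
    | succ f =>
      have hpre : (['.','.','.'] : List Char).isPrefixOf (c :: (t' ++ ['.','.'])) = false := by
        rw [Bool.eq_false_iff]
        intro hcp
        have hp := List.isPrefixOf_iff_prefix.mp hcp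
        rw [List.cons_prefix_cons] at hp
        obtain ⟨hx, hp2⟩ := hp
        cases t' with
        | nil =>
          have hok2 : OkL (c :: ['.']) := by simpa using hok
          have hc := (List.isChain_cons_cons.mp hok2).1
          exact hc ⟨hx.symm, rfl⟩
        | cons e r =>
          have hok2 : OkL (c :: e :: (r ++ ['.'])) := by simpa using hok
          have hce := (List.isChain_cons_cons.mp hok2).1
          rw [show ((e :: r) ++ ['.','.']) = e :: (r ++ ['.','.']) from rfl, List.cons_prefix_cons] at hp2
          exact hce ⟨hx.symm, hp2.1.symm⟩
      rw [show ((c :: t') ++ ['.','.']) = c :: (t' ++ ['.','.']) from rfl]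
      rw [show PySem.Chars.replace.go ['.','.','.'] ['.'] (f+1) (c :: (t' ++ ['.','.'])) acc =
          (if (['.','.','.'] : List Char).isPrefixOf (c :: (t' ++ ['.','.'])) then
            PySem.Chars.replace.go ['.','.','.'] ['.'] f (List.drop 3 (c :: (t' ++ ['.','.']))) (['.'].reverse ++ acc)
           else PySem.Chars.replace.go ['.','.','.'] ['.'] f (t' ++ ['.','.']) (c :: acc)) from by
        simp [PySem.Chars.replace.go]]
      rw [hpre]
      simp only [Bool.false_eq_true, if_false]
      rw [ih f (c :: acc) (by simp only [List.length_cons] at hf; omega) (List.IsChain.tail hok)]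
      simp

theorem rep2_collapse (t : List Char) (h : OkL (t ++ ['.'])) :
    PySem.Chars.replace (t ++ ['.','.']) ['.','.'] ['.'] = t ++ ['.'] := by
  unfold PySem.Chars.replace
  rw [if_neg (by simp)]
  rw [go2_collapse t (t ++ ['.','.']).length [] (by simp) h]
  simp

theorem rep3_skip (t : List Char) (h : OkL (t ++ ['.'])) :
    PySem.Chars.replace (t ++ ['.','.']) ['.','.','.'] ['.'] = t ++ ['.','.'] := by
  unfold PySem.Chars.replace
  rw [if_neg (by simp)]
  rw [go3_skip t (t ++ ['.','.']).length [] (by simp) h]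
  simp

theorem okl_append_singleton (xs : List Char) (c : Char) (hok : OkL xs)
    (h : ¬(c = '.' ∧ xs.getLast? = some '.')) : OkL (xs ++ [c]) := by
  rw [OkL, List.isChain_append]
  refine ⟨hok, by simp, ?_⟩
  intro x hx y hy
  simp at hy
  subst hy
  intro ⟨hx1, hy1⟩
  exact h ⟨hy1, by rw [← hx1]; exact hx⟩

theorem stepA_eq (s : String) (xs : List Char) (hs : s.toList = xs) (hok : OkL xs)
    (c : Char) (hc : pvDomChar c = true) :
    (pvStepA s c).toList = pvStepB xs c ∧ OkL (pvStepB xs c) := by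
  obtain ⟨hmap, _⟩ := pvChar_spec c hc
  have h3 : ("..." : String).toList = ['.','.','.'] := rfl
  have h2 : (".." : String).toList = ['.','.'] := rfl
  have h1 : ("." : String).toList = ['.'] := rfl
  by_cases hrem : pvRemoved.contains (PySem.Chars.lowerChar c) = true
  · rw [hrem, if_pos rfl] at hmap
    have hstep : (pvStepA s c).toList = xs := by
      simp only [pvStepA, PySem.Str.toList_replace, String.toList_append, hmap, h3, h2, h1, hs]
      simp only [String.toList_empty]
      rw [List.append_nil]
      rw [rep3_ok xs hok, rep2_ok xs hok]
    have hstepB : pvStepB xs c = xs := by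
      unfold pvStepB; dsimp only; rw [if_pos hrem]
    rw [hstep, hstepB]
    exact ⟨rfl, hok⟩
  · rw [if_neg hrem] at hmap
    set c' := PySem.Chars.lowerChar c with hc'
    have hsing : (String.singleton c').toList = [c'] := by simp
    by_cases hskip : c' = '.' ∧ xs ≠ [] ∧ xs.getLast? = some '.'
    · obtain ⟨hdot, hne, hlast⟩ := hskip
      obtain ⟨t, ht⟩ := List.getLast?_eq_some_iff.mp hlast
      have hstep : (pvStepA s c).toList = xs := by
        simp only [pvStepA, PySem.Str.toList_replace, String.toList_append, hmap, hsing, h3, h2, h1, hs]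
        rw [hdot, ht, List.append_assoc]
        rw [show (['.'] ++ ['.'] : List Char) = ['.','.'] from rfl]
        rw [rep3_skip t (by rw [← ht]; exact hok), rep2_collapse t (by rw [← ht]; exact hok)]
      have hstepB : pvStepB xs c = xs := by
        simp only [pvStepB, ← hc']
        rw [if_neg hrem, if_pos ⟨hdot, hne, hlast⟩]
      rw [hstep, hstepB]
      exact ⟨rfl, hok⟩
    · have hok' : OkL (xs ++ [c']) := by
        apply okl_append_singleton xs c' hok
        intro ⟨hd, hl⟩
        exact hskip ⟨hd, by rintro rfl; simp at hl, hl⟩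
      have hstep : (pvStepA s c).toList = xs ++ [c'] := by
        simp only [pvStepA, PySem.Str.toList_replace, String.toList_append, hmap, hsing, h3, h2, h1, hs]
        rw [rep3_ok _ hok', rep2_ok _ hok']
      have hstepB : pvStepB xs c = xs ++ [c'] := by
        simp only [pvStepB, ← hc']
        rw [if_neg hrem, if_neg hskip]
      rw [hstep, hstepB]
      exact ⟨rfl, hok'⟩

theorem loop_eq : ∀ (l : List Char) (s : String) (xs : List Char),
    (∀ c ∈ l, pvDomChar c = true) → s.toList = xs → OkL xs →
    (l.foldl pvStepA s).toList = l.foldl pvStepB xs ∧ OkL (l.foldl pvStepB xs) := by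
  intro l
  induction l with
  | nil => intro s xs _ hs hok; exact ⟨hs, hok⟩
  | cons c l ih =>
    intro s xs hall hs hok
    obtain ⟨h1, h2⟩ := stepA_eq s xs hs hok c (hall c (by simp))
    simpa using ih (pvStepA s c) (pvStepB xs c) (fun d hd => hall d (by simp [hd])) h1 h2

theorem stepB_ne (out : List Char) (c : Char) (h : out ≠ []) : pvStepB out c ≠ [] := by
  unfold pvStepB
  dsimp only
  split_ifs <;> simp [h]

theorem foldl_stepB_ne : ∀ (l : List Char) (out : List Char),
    (∀ c ∈ l, pvDomChar c = true) →
    (out ≠ [] ∨ ∃ c ∈ l, c ∉ pvPunct) → l.foldl pvStepB out ≠ [] := by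
  intro l
  induction l with
  | nil =>
    intro out _ h
    rcases h with h | ⟨c, hc, _⟩
    · simpa using h
    · simp at hc
  | cons c l ih =>
    intro out hall h
    rcases h with h | ⟨d, hd, hdp⟩
    · exact ih (pvStepB out c) (fun e he => hall e (by simp [he])) (Or.inl (stepB_ne out c h))
    · rcases List.mem_cons.mp hd with rfl | hdl
      · have hrem : ¬ pvRemoved.contains (PySem.Chars.lowerChar d) = true := fun hcon =>
          hdp ((pvChar_spec d (hall d (by simp))).2.mpr hcon)
        apply ih _ (fun e he => hall e (by simp [he]))
        left
        unfold pvStepB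
        dsimp only
        rw [if_neg hrem]
        split_ifs with hsk
        · exact hsk.2.1
        · simp
      · exact ih (pvStepB out c) (fun e he => hall e (by simp [he])) (Or.inr ⟨d, hdl, hdp⟩)

theorem dw_dot (xs : List Char) (h : OkL xs) :
    xs.dropWhile (fun c => (['.'] : List Char).contains c) =
      if xs.head? = some '.' then xs.tail else xs := by
  cases xs with
  | nil => simp
  | cons a t =>
    by_cases ha : a = '.'
    · subst ha
      rw [if_pos (by simp)]
      simp only [List.dropWhile]
      rw [show ((['.'] : List Char).contains '.') = true from by decide]
      cases t with
      | nil => simp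
      | cons b r =>
        have hb : b ≠ '.' := by
          have := (List.isChain_cons_cons.mp h).1
          intro hb; exact this ⟨rfl, hb⟩
        simp only [List.dropWhile]
        rw [show ((['.'] : List Char).contains b) = false from by simp [hb]]
        simp
    · rw [if_neg (by simp [ha])]
      simp only [List.dropWhile]
      rw [show ((['.'] : List Char).contains a) = false from by simp [ha]]

theorem okl_reverse (xs : List Char) (h : OkL xs) : OkL xs.reverse := by
  rw [OkL, List.isChain_reverse]
  exact h.imp (fun _ _ hr => fun ⟨h1, h2⟩ => hr ⟨h2, h1⟩)

theorem strip_dot (xs : List Char) (h : OkL xs) :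
    PySem.Chars.stripChars xs ['.'] =
      (if (if xs.head? = some '.' then xs.tail else xs).getLast? = some '.'
       then (if xs.head? = some '.' then xs.tail else xs).dropLast
       else (if xs.head? = some '.' then xs.tail else xs)) := by
  have hdef : PySem.Chars.stripChars xs ['.'] =
      (List.dropWhile (fun c => (['.'] : List Char).contains c)
        (List.dropWhile (fun c => (['.'] : List Char).contains c) xs).reverse).reverse := rfl
  rw [hdef, dw_dot xs h]
  set z := if xs.head? = some '.' then xs.tail else xs with hz
  have hokz : OkL z := by
    rw [hz]; split_ifs
    · exact h.tail
    · exact h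
  rw [dw_dot z.reverse (okl_reverse z hokz)]
  rw [List.head?_reverse]
  split_ifs with hlast
  · rw [List.tail_reverse, List.reverse_reverse]
  · rw [List.reverse_reverse]

theorem ofList_eq_nil_iff (v : List Char) : String.ofList v = "" ↔ v = [] := by
  rw [← String.toList_inj]; simp

theorem len_ofList (v : List Char) : PySem.Str.len (String.ofList v) = (v.length : Int) := by
  simp [PySem.Str.len]

theorem len_eq_toList (t : String) : PySem.Str.len t = (t.toList.length : Int) := by
  simp [PySem.Str.len]

theorem pyGetNeg1 (t : String) : PySem.Str.pyGet? t (-1) = t.toList.getLast? := by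
  simp [PySem.Str.pyGet?, PySem.List.pyGet?_neg_one]

theorem pyGet0 (t : String) : PySem.Str.pyGet? t 0 = t.toList.head? := by
  simp [PySem.Str.pyGet?, PySem.List.pyGet?_zero]
  cases t.toList <;> simp

theorem slice15 (t : String) : PySem.Str.slice t none (some 15) = String.ofList (t.toList.take 15) := by
  rw [← String.toList_inj]
  simp [PySem.Str.toList_slice]
  rw [PySem.List.slice_to _ (by norm_num)]
  show List.take (Int.toNat 15) t.toList = List.take 15 t.toList
  rfl

theorem sliceNeg1 (t : String) : PySem.Str.slice t none (some (-1)) = String.ofList t.toList.dropLast := by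
  rw [← String.toList_inj]
  simp [PySem.Str.toList_slice, PySem.List.slice_to_neg_one]

theorem slice1from (t : String) : PySem.Str.slice t (some 1) none = String.ofList t.toList.tail := by
  rw [← String.toList_inj]
  simp [PySem.Str.toList_slice, PySem.List.slice_from_one]

theorem strip_str (t : String) :
    PySem.Str.stripChars t "." = String.ofList (PySem.Chars.stripChars t.toList ['.']) := by
  rw [← String.toList_inj]
  simp [PySem.Str.toList_stripChars]

theorem pad_eq (s : String) (h : s.toList ≠ []) :
    (if PySem.Str.len s ≤ 2 then pvPadA 3 s else s) =
    (if PySem.Str.len s < 3 then pvPadB s else s) := by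
  match hm : s.toList with
  | [a] =>
    rw [if_pos (by rw [len_eq_toList, hm]; norm_num), if_pos (by rw [len_eq_toList, hm]; norm_num)]
    have e1 : pvPadA 3 s = (s.push a).push a := by
      show (if PySem.Str.len s ≤ 2 then
          match PySem.Str.pyGet? s (-1) with
          | some ch => pvPadA 2 (s.push ch)
          | none => s
        else s) = _
      rw [if_pos (by rw [len_eq_toList, hm]; norm_num), pyGetNeg1, hm]
      show pvPadA 2 (s.push a) = _
      have hp1 : (s.push a).toList = [a, a] := by rw [String.toList_push, hm]; rfl
      show (if PySem.Str.len (s.push a) ≤ 2 then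
          match PySem.Str.pyGet? (s.push a) (-1) with
          | some ch => pvPadA 1 ((s.push a).push ch)
          | none => s.push a
        else s.push a) = _
      rw [if_pos (by rw [len_eq_toList, hp1]; norm_num), pyGetNeg1, hp1]
      show pvPadA 1 ((s.push a).push a) = _
      have hp2 : ((s.push a).push a).toList = [a, a, a] := by
        rw [String.toList_push, hp1]; rfl
      show (if PySem.Str.len ((s.push a).push a) ≤ 2 then
          match PySem.Str.pyGet? ((s.push a).push a) (-1) with
          | some ch => pvPadA 0 (((s.push a).push a).push ch)
          | none => (s.push a).push a
        else (s.push a).push a) = _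
      rw [if_neg (by rw [len_eq_toList, hp2]; norm_num)]
    have e2 : pvPadB s = s ++ String.ofList [a, a] := by
      unfold pvPadB
      rw [pyGetNeg1, hm]
      rfl
    rw [e1, e2, ← String.toList_inj]
    simp [String.toList_push]
  | [a, b] =>
    rw [if_pos (by rw [len_eq_toList, hm]; norm_num), if_pos (by rw [len_eq_toList, hm]; norm_num)]
    have e1 : pvPadA 3 s = s.push b := by
      show (if PySem.Str.len s ≤ 2 then
          match PySem.Str.pyGet? s (-1) with
          | some ch => pvPadA 2 (s.push ch)
          | none => s
        else s) = _
      rw [if_pos (by rw [len_eq_toList, hm]; norm_num), pyGetNeg1, hm]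
      show pvPadA 2 (s.push b) = _
      have hp1 : (s.push b).toList = [a, b, b] := by rw [String.toList_push, hm]; rfl
      show (if PySem.Str.len (s.push b) ≤ 2 then
          match PySem.Str.pyGet? (s.push b) (-1) with
          | some ch => pvPadA 1 ((s.push b).push ch)
          | none => s.push b
        else s.push b) = _
      rw [if_neg (by rw [len_eq_toList, hp1]; norm_num)]
    have e2 : pvPadB s = s ++ String.ofList [b] := by
      unfold pvPadB
      rw [pyGetNeg1, hm]
      rfl
    rw [e1, e2, ← String.toList_inj]
    simp [String.toList_push]
  | a :: b :: c :: r =>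
    have hg1 : ¬ (PySem.Str.len s ≤ 2) := by
      rw [len_eq_toList, hm]; simp only [List.length_cons]; push_cast; omega
    have hg2 : ¬ (PySem.Str.len s < 3) := by
      rw [len_eq_toList, hm]; simp only [List.length_cons]; push_cast; omega
    rw [if_neg hg1, if_neg hg2]
  | [] => exact absurd hm h

theorem tail_core (v : List Char) (hok : OkL v) (hne : v ≠ [])
    (hh : v.head? ≠ some '.') (hl : v.getLast? ≠ some '.') :
    (let a4 := if String.ofList v = "" then "a" else String.ofList v
     let a5 := if 16 ≤ PySem.Str.len a4 then
         (let w := PySem.Str.slice a4 none (some 15)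
          if PySem.Str.pyGet? w (-1) = some '.' then PySem.Str.slice w none (some (-1)) else w)
       else a4
     if PySem.Str.len a5 ≤ 2 then pvPadA 3 a5 else a5)
    =
    (let s2 := PySem.Str.stripChars (PySem.Str.slice (String.ofList v) none (some 15)) "."
     let s3 := if s2 = "" then "a" else s2
     if PySem.Str.len s3 < 3 then pvPadB s3 else s3) := by
  dsimp only
  rw [if_neg ((not_congr (ofList_eq_nil_iff v)).mpr hne)]
  have hovl : (String.ofList v).toList = v := by simp
  have hsv : (String.ofList (v.take 15)).toList = v.take 15 := by simp
  have hok15 : OkL (v.take 15) := List.IsChain.prefix hok (List.take_prefix 15 v)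
  have hh15 : (v.take 15).head? ≠ some '.' := by
    cases v with
    | nil => simp
    | cons x t => simpa using hh
  rw [slice15, hovl, strip_str, hsv, strip_dot _ hok15, if_neg hh15]
  rw [pyGetNeg1 (String.ofList (List.take 15 v)), hsv]
  by_cases h16 : (16 : Int) ≤ v.length
  · have hc16 : (16 : Int) ≤ PySem.Str.len (String.ofList v) := by rw [len_ofList]; exact h16
    have hlen15 : (v.take 15).length = 15 := by
      rw [List.length_take]
      omega
    have hne15 : v.take 15 ≠ [] := by
      intro hcon; rw [hcon] at hlen15; simp at hlen15
    by_cases hl15 : (v.take 15).getLast? = some '.'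
    · rw [if_pos hl15, sliceNeg1, hsv, if_pos hl15, if_pos hc16]
      have hlen14 : (v.take 15).dropLast.length = 14 := by
        rw [List.length_dropLast, hlen15]
      have hne14 : (v.take 15).dropLast ≠ [] := by
        intro hcon; rw [hcon] at hlen14; simp at hlen14
      have hA : ¬ (PySem.Str.len (String.ofList (v.take 15).dropLast) ≤ 2) := by
        rw [len_ofList, hlen14]; norm_num
      have hB : ¬ (PySem.Str.len (String.ofList (v.take 15).dropLast) < 3) := by
        rw [len_ofList, hlen14]; norm_num
      rw [if_neg ((not_congr (ofList_eq_nil_iff _)).mpr hne14), if_neg hA, if_neg hB]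
    · rw [if_neg hl15, if_neg hl15, if_pos hc16]
      have hA : ¬ (PySem.Str.len (String.ofList (v.take 15)) ≤ 2) := by
        rw [len_ofList, hlen15]; norm_num
      have hB : ¬ (PySem.Str.len (String.ofList (v.take 15)) < 3) := by
        rw [len_ofList, hlen15]; norm_num
      rw [if_neg ((not_congr (ofList_eq_nil_iff _)).mpr hne15), if_neg hA, if_neg hB]
  · have hc16 : ¬ ((16 : Int) ≤ PySem.Str.len (String.ofList v)) := by rw [len_ofList]; exact h16
    have htk : v.take 15 = v := by
      apply List.take_of_length_le
      omega
    rw [if_neg hc16, htk, if_neg hl]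
    rw [if_neg ((not_congr (ofList_eq_nil_iff v)).mpr hne)]
    exact pad_eq (String.ofList v) (by simpa using hne)

theorem tail_mid (β : String) (zs : List Char) (hs : β.toList = zs) (hok : OkL zs)
    (hne : zs ≠ []) (hh : zs.head? ≠ some '.') :
    (let a3 := if PySem.Str.pyGet? β (-1) = some '.' then PySem.Str.slice β none (some (-1)) else β
     let a4 := if a3 = "" then "a" else a3
     let a5 := if 16 ≤ PySem.Str.len a4 then
         (let w := PySem.Str.slice a4 none (some 15)
          if PySem.Str.pyGet? w (-1) = some '.' then PySem.Str.slice w none (some (-1)) else w)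
       else a4
     if PySem.Str.len a5 ≤ 2 then pvPadA 3 a5 else a5)
    =
    (let s1 := String.ofList (if zs.getLast? = some '.' then zs.dropLast else zs)
     let s2 := PySem.Str.stripChars (PySem.Str.slice s1 none (some 15)) "."
     let s3 := if s2 = "" then "a" else s2
     if PySem.Str.len s3 < 3 then pvPadB s3 else s3) := by
  dsimp only
  rw [pyGetNeg1, hs]
  by_cases hlast : zs.getLast? = some '.'
  · rw [if_pos hlast, if_pos hlast, sliceNeg1, hs]
    obtain ⟨t, ht⟩ := List.getLast?_eq_some_iff.mp hlast
    have hdl : zs.dropLast = t := by rw [ht, List.dropLast_concat]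
    have hokt : OkL t := by
      rw [ht] at hok
      exact List.IsChain.prefix hok (List.prefix_append t ['.'])
    have hlt : t.getLast? ≠ some '.' := by
      intro hcon
      obtain ⟨u, hu⟩ := List.getLast?_eq_some_iff.mp hcon
      rw [ht, hu] at hok
      have : OkL (u ++ ['.','.']) := by simpa using hok
      have h2 : OkL (('.' : Char) :: ['.']) :=
        List.IsChain.suffix this ⟨u, rfl⟩
      exact (List.isChain_cons_cons.mp h2).1 ⟨rfl, rfl⟩
    have hnet : t ≠ [] := by
      intro hcon
      rw [hcon] at ht
      rw [ht] at hh
      simp at hh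
    have hht : t.head? ≠ some '.' := by
      intro hcon
      rw [ht] at hh
      cases t with
      | nil => exact hnet rfl
      | cons x u => simp at hcon hh; exact hh (by simpa using hcon)
    rw [hdl]
    exact tail_core t hokt hnet hht hlt
  · rw [if_neg hlast, if_neg hlast]
    have hβ : β = String.ofList zs := by rw [← String.toList_inj]; simp [hs]
    rw [hβ]
    exact tail_core zs hok hne hh hlast

theorem tail_eq (α : String) (xs : List Char) (hs : α.toList = xs) (hok : OkL xs) (hne : xs ≠ []) :
    (let a1 := if α = "." then "a" else α
     let a2 := if PySem.Str.pyGet? a1 0 = some '.' then PySem.Str.slice a1 (some 1) none else a1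
     let a3 := if PySem.Str.pyGet? a2 (-1) = some '.' then PySem.Str.slice a2 none (some (-1)) else a2
     let a4 := if a3 = "" then "a" else a3
     let a5 := if 16 ≤ PySem.Str.len a4 then
         (let w := PySem.Str.slice a4 none (some 15)
          if PySem.Str.pyGet? w (-1) = some '.' then PySem.Str.slice w none (some (-1)) else w)
       else a4
     if PySem.Str.len a5 ≤ 2 then pvPadA 3 a5 else a5)
    =
    (let s1 := PySem.Str.stripChars (String.ofList xs) "."
     let s2 := PySem.Str.stripChars (PySem.Str.slice s1 none (some 15)) "."
     let s3 := if s2 = "" then "a" else s2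
     if PySem.Str.len s3 < 3 then pvPadB s3 else s3) := by
  dsimp only
  have hovl : (String.ofList xs).toList = xs := by simp
  rw [strip_str (String.ofList xs), hovl, strip_dot xs hok]
  by_cases hxs : xs = ['.']
  · have hα : α = "." := by rw [← String.toList_inj, hs, hxs]; rfl
    rw [hα, hxs]
    decide
  · have hα : α ≠ "." := fun he => hxs (by rw [← hs, he]; rfl)
    rw [if_neg hα, pyGet0, hs]
    cases xs with
    | nil => exact absurd rfl hne
    | cons a t =>
      simp only [List.head?_cons]
      by_cases ha : a = '.'
      · subst ha
        have hnt : t ≠ [] := fun hcon => hxs (by rw [hcon])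
        rw [if_pos rfl, if_pos rfl, slice1from, hs]
        simp only [List.tail_cons]
        have hts : (String.ofList t).toList = t := by simp
        have hokt : OkL t := List.IsChain.tail hok
        have hht : t.head? ≠ some '.' := by
          cases t with
          | nil => simp
          | cons x u =>
            have := (List.isChain_cons_cons.mp hok).1
            intro hcon
            simp at hcon
            exact this ⟨rfl, hcon⟩
        exact tail_mid _ t hts hokt hnt hht
      · have hsome : ¬ (some a = some '.') := by simpa using ha
        rw [if_neg hsome, if_neg hsome]
        exact tail_mid α (a :: t) hs hok hne (by simpa using ha)

-- ===== VERDICT (by name: the statement is the Claim_ definition above) =====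
theorem solution_spec : Claim_equal_solution := by
  unfold Claim_equal_solution Spec_solution
  intro new_id hdom hpre
  have hall : ∀ c ∈ new_id.toList, pvDomChar c = true := by
    unfold Dom_solution pvDomStr at hdom
    simpa [List.all_eq_true] using hdom
  obtain ⟨hfold, hok⟩ := loop_eq new_id.toList "" [] hall rfl List.isChain_nil
  have hpre' : ∃ c ∈ new_id.toList, c ∉ pvPunct := by
    obtain ⟨c, hc, hb⟩ := List.any_eq_true.mp hpre
    exact ⟨c, hc, by simpa using hb⟩
  have hne : new_id.toList.foldl pvStepB [] ≠ [] := foldl_stepB_ne _ _ hall (Or.inr hpre')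
  have hα : new_id.toList.foldl pvStepA "" = String.ofList (new_id.toList.foldl pvStepB []) := by
    rw [← String.toList_inj]
    simp [hfold]
  show solution new_id = solution_alt new_id
  unfold solution solution_alt
  rw [hα]
  exact tail_eq _ _ (by simp) hok hne
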